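-- pv_equiv track=rewrite | github.com/RadoBoiii/Beat-Bridge | webapp/utils/helpers.py | format_artist_name
-- ===== SOURCE A (Python) =====
-- def format_artist_name(artists):
--     """
--     Format a list of artists into a string
--
--     Args:
--         artists (list): List of artist dictionaries or names
--
--     Returns:
--         str: Formatted artist string (e.g., "Artist1, Artist2 & Artist3")
--     """
--     if not artists:
--         return "Unknown Artist"
--
--     if isinstance(artists[0], dict) and 'name' in artists[0]:
--         artist_names = [artist['name'] for artist in artists]
--     else:
--         artist_names = artists
--
--     if len(artist_names) == 1:
--         return artist_names[0]
--     elif len(artist_names) == 2: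
--         return f"{artist_names[0]} & {artist_names[1]}"
--     else:
--         return f"{', '.join(artist_names[:-1])} & {artist_names[-1]}"
-- ===== SOURCE B (Python) =====
-- def format_artist_name(artists):
--     """Same result as A, built in one left-to-right accumulator pass
--     (no length-based branch cascade, no join over a slice)."""
--     if not artists:
--         return "Unknown Artist"
--
--     if isinstance(artists[0], dict) and 'name' in artists[0]:
--         names = [artist['name'] for artist in artists]
--     else:
--         names = artists
--
--     acc = names[0]
--     rest = names[1:]
--     for j in range(len(rest) - 1):
--         acc += ", " + rest[j]
--     if rest:
--         acc = acc + " & " + rest[-1]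
--     return acc
-- ===== Notes on version B (the rewrite author's own statement) =====
-- stated objective: alternative
-- what changed: Replaced A's len==1/len==2/else cascade with join over a [:-1] slice by a single left-to-right accumulator pass that appends ', ' before every middle name and ' & ' before the final one.
import Mathlib
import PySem

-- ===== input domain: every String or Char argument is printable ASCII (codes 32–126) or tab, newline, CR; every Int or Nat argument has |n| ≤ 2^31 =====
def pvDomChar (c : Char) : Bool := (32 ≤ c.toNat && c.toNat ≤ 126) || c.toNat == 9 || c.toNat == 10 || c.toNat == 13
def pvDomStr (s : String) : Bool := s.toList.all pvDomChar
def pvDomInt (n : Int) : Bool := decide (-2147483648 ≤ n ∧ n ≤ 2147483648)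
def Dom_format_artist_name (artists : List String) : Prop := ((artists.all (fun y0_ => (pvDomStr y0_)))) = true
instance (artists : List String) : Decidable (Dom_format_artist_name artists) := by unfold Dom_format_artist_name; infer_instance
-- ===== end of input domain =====

-- B replaces A's length-branch cascade (len==1 / len==2 / join over a [:-1] slice)
-- by one left-to-right accumulator pass over indices; same return value on every input.
-- Under the List String type convention the dict branch of both Pythons is vacuous
-- (artists[0] is never a dict), so both ports take the plain-names path.

-- ===== PORT A =====
def format_artist_name (artists : List String) : String :=
  if artists = [] then "Unknown Artist"
  else
    let artist_names := artists
    if artist_names.length = 1 then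
      PySem.List.pyGetD artist_names 0 ""
    else if artist_names.length = 2 then
      PySem.List.pyGetD artist_names 0 "" ++ " & " ++ PySem.List.pyGetD artist_names 1 ""
    else
      PySem.Str.join ", " (PySem.List.slice artist_names none (some (-1)))
        ++ " & " ++ PySem.List.pyGetD artist_names (-1) ""

-- ===== PORT B =====
def format_artist_name_alt (artists : List String) : String :=
  match artists with
  | [] => "Unknown Artist"
  | x :: xs =>
    let rest := PySem.List.slice (x :: xs) (some 1) none
    let acc := (PySem.List.pyRange 0 ((rest.length : Int) - 1) 1).foldl
      (fun acc j => acc ++ ", " ++ PySem.List.pyGetD rest j "") x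
    if rest ≠ [] then acc ++ " & " ++ PySem.List.pyGetD rest (-1) "" else acc

-- ===== PRECONDITION & SPEC =====
def Spec_format_artist_name (artists : List String) (out : String) : Prop := out = format_artist_name_alt artists
instance (artists : List String) (out : String) : Decidable (Spec_format_artist_name artists out) := by unfold Spec_format_artist_name; infer_instance

-- ===== CLAIM (what is proved, stated in full; the proofs are below) =====
def Claim_equal_format_artist_name : Prop := ∀ (artists : List String), Dom_format_artist_name artists → Spec_format_artist_name artists (format_artist_name artists)

-- ===== LEMMAS AND PROOFS =====

theorem str_join_singleton (x : String) : PySem.Str.join ", " [x] = x := by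
  apply String.toList_inj.mp
  simp [PySem.Str.toList_join, PySem.Chars.join_singleton]

theorem join_shift (zs : List String) (a b : String) :
    PySem.Str.join ", " ((a ++ ", " ++ b) :: zs) = PySem.Str.join ", " (a :: b :: zs) := by
  apply String.toList_inj.mp
  cases zs with
  | nil =>
      simp [PySem.Str.toList_join, PySem.Chars.join_singleton, PySem.Chars.join_cons_cons]
  | cons c cs =>
      simp [PySem.Str.toList_join, PySem.Chars.join_cons_cons]

-- ', '.join(x :: ys) is the left fold B's loop performs
theorem join_eq_foldl (ys : List String) : ∀ (x : String),
    PySem.Str.join ", " (x :: ys) = ys.foldl (fun a s => a ++ ", " ++ s) x := by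
  induction ys with
  | nil => intro x; rw [List.foldl_nil]; exact str_join_singleton x
  | cons z zs ih =>
      intro x
      rw [← join_shift zs x z, ih (x ++ ", " ++ z)]
      rfl

-- B's index loop over range(len(rest)-1) is a fold over rest.dropLast
theorem range_foldl_eq_dropLast (xs : List String) (x : String) :
    (PySem.List.pyRange 0 ((xs.length : Int) - 1) 1).foldl
      (fun acc j => acc ++ ", " ++ PySem.List.pyGetD xs j "") x
    = xs.dropLast.foldl (fun a s => a ++ ", " ++ s) x := by
  cases xs with
  | nil =>
      have h0 : PySem.List.pyRange 0 ((([] : List String).length : Int) - 1) 1 = [] := by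
        apply PySem.List.pyRange_one_eq_nil
        simp
      rw [h0]
      rfl
  | cons w ws =>
  have hm : (((w :: ws).length : Int) - 1) = ((w :: ws).dropLast.length : Int) := by
    simp
  rw [hm]
  have hcongr : (PySem.List.pyRange 0 (((w :: ws).dropLast.length : Int)) 1).foldl
      (fun acc j => acc ++ ", " ++ PySem.List.pyGetD (w :: ws) j "") x
    = (PySem.List.pyRange 0 (((w :: ws).dropLast.length : Int)) 1).foldl
      (fun acc j => acc ++ ", " ++ PySem.List.pyGetD (w :: ws).dropLast j "") x := by
    apply PySem.List.foldl_congr_mem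
    intro acc j hj
    have hb := (PySem.List.mem_pyRange_one).mp hj
    obtain ⟨h0, h1⟩ := hb
    have hk : j = ((j.toNat : Nat) : Int) := by omega
    rw [hk, PySem.List.pyGetD_natCast, PySem.List.pyGetD_natCast]
    have hlt : j.toNat < (w :: ws).dropLast.length := by omega
    have hlt' : j.toNat < (w :: ws).length := by
      have := (w :: ws).length_dropLast
      omega
    simp [List.getD_eq_getElem?_getD, List.getElem?_eq_getElem hlt, List.getElem?_eq_getElem hlt',
      List.getElem_dropLast]
  rw [hcongr]
  have := PySem.List.foldl_pyRange_pyGetD' (xs := (w :: ws).dropLast)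
    (f := fun (a s : String) => a ++ ", " ++ s) (d := "") (init := x) (a := 0) (by omega)
  simpa using this

-- unfolds B's port at a cons argument
theorem alt_cons (x : String) (xs : List String) :
    format_artist_name_alt (x :: xs) =
      if xs ≠ [] then
        (PySem.List.pyRange 0 ((xs.length : Int) - 1) 1).foldl
          (fun acc j => acc ++ ", " ++ PySem.List.pyGetD xs j "") x
          ++ " & " ++ PySem.List.pyGetD xs (-1) ""
      else x := by
  cases xs with
  | nil =>
      simp [format_artist_name_alt, PySem.List.slice_from_one]
  | cons w ws =>
      simp [format_artist_name_alt, PySem.List.slice_from_one]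

-- ===== VERDICT (by name: the statement is the Claim_ definition above) =====
theorem format_artist_name_spec : Claim_equal_format_artist_name := by
  intro artists _
  unfold Spec_format_artist_name
  match artists with
  | [] => rfl
  | [x] =>
      rw [alt_cons]
      simp [format_artist_name, PySem.List.pyGetD]
  | [x, y] =>
      rw [alt_cons]
      simp [format_artist_name, PySem.List.pyGetD, PySem.List.pyIdx?, PySem.List.pyGet?]
  | x :: y :: z :: zs =>
      have hne : (y :: z :: zs : List String) ≠ [] := by simp
      rw [alt_cons, if_pos hne, range_foldl_eq_dropLast, PySem.List.pyGetD_neg_one _ _ hne]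
      unfold format_artist_name
      rw [if_neg (by simp : ¬(x :: y :: z :: zs : List String) = [])]
      have h1 : ¬((x :: y :: z :: zs : List String).length = 1) := by simp
      have h2 : ¬((x :: y :: z :: zs : List String).length = 2) := by simp
      rw [if_neg h1, if_neg h2, PySem.List.slice_to_neg_one,
        PySem.List.pyGetD_neg_one _ _ (by simp)]
      have hlast : (x :: y :: z :: zs).getLast (by simp) = (y :: z :: zs).getLast hne := by
        simp [List.getLast_cons]
      have hdrop : (x :: y :: z :: zs).dropLast = x :: (y :: z :: zs).dropLast := by
        simp [List.dropLast_cons₂]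
      rw [hlast, hdrop, join_eq_foldl]
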